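-- pv_equiv track=rewrite | github.com/Rafaeltheraven/The-Propaganda-Machine | NLG/content_selection.py | split_turns
-- ===== SOURCE A (Python) =====
-- def split_turns(frame):
-- 	result = []
-- 	curr = []
-- 	player = frame[0]["player1"]
-- 	for event in frame:
-- 		if event["player1"] != player:
-- 			result.append(curr)
-- 			curr = [event]
-- 			player = event["player1"]
-- 		else:
-- 			curr.append(event)
-- 	result.append(curr)
-- 	return result
-- ===== SOURCE B (Python) =====
-- def split_turns(frame):
-- 	result = []
-- 	i = 0
-- 	n = len(frame)
-- 	while i < n:
-- 		p = frame[i]["player1"]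
-- 		j = i + 1
-- 		while j < n and frame[j]["player1"] == p:
-- 			j += 1
-- 		result.append(frame[i:j])
-- 		i = j
-- 	return result
-- ===== Notes on version B (the rewrite author's own statement) =====
-- stated objective: alternative
-- what changed: B replaces A's streaming accumulator (curr/player state threaded through one for-loop) with block extraction: it repeatedly finds the end of the current same-player run and slices that whole run out at once.
import Mathlib
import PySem

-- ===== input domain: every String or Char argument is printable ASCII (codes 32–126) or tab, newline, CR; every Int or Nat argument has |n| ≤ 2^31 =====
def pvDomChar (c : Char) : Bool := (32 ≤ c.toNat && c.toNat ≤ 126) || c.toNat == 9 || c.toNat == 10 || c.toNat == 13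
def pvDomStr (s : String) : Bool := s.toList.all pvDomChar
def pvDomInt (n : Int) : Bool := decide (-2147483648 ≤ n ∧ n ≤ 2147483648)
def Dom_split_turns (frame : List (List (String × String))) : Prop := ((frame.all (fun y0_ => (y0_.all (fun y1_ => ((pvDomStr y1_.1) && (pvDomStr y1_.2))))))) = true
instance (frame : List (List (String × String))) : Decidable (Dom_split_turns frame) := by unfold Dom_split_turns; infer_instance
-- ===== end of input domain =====

-- B replaces A's streaming accumulator with run extraction (find the end of each same-player
-- run, emit it whole); same O(n) cost, different decomposition. Equivalence of return values.

-- event["player1"]: first match in the association list (Python dict lookup); Pre_ guarantees presence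
def pvKey (e : List (String × String)) : String := (List.lookup "player1" e).getD ""

-- ===== PORT A =====
-- the body of A's for-loop, acting on the state (result, curr, player)
def pvAStep (st : List (List (List (String × String))) × List (List (String × String)) × String)
    (event : List (String × String)) :
    List (List (List (String × String))) × List (List (String × String)) × String :=
  if pvKey event ≠ st.2.2 then (st.1 ++ [st.2.1], [event], pvKey event)
  else (st.1, st.2.1 ++ [event], st.2.2)

def split_turns (frame : List (List (String × String))) : List (List (List (String × String))) :=
  let player := (frame.head?.map pvKey).getD ""   -- frame[0]["player1"]; Pre_ excludes the empty frame
  let st := frame.foldl pvAStep ([], [], player)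
  st.1 ++ [st.2.1]

-- ===== PORT B =====
-- Source B's outer while-loop: each iteration takes the run frame[i:j] of the current player and moves on
def pvRuns : List (List (String × String)) → List (List (List (String × String)))
  | [] => []
  | e :: rest =>
      (e :: rest.takeWhile (fun x => pvKey x == pvKey e)) ::
        pvRuns (rest.dropWhile (fun x => pvKey x == pvKey e))
  termination_by l => l.length
  decreasing_by exact Nat.lt_succ_of_le (List.length_dropWhile_le _ _)

def split_turns_alt (frame : List (List (String × String))) : List (List (List (String × String))) :=
  pvRuns frame

-- ===== PRECONDITION & SPEC =====
-- A raises IndexError on the empty frame and KeyError when some event lacks "player1"; Pre_ excludes exactly those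
def Pre_split_turns (frame : List (List (String × String))) : Prop :=
  frame ≠ [] ∧ ∀ e ∈ frame, (List.lookup "player1" e).isSome
instance (frame : List (List (String × String))) : Decidable (Pre_split_turns frame) := by
  unfold Pre_split_turns; infer_instance

def pvWitness_split_turns : (List (List (String × String))) :=
  [[("player1", "a")], [("player1", "b")], [("player1", "b")]]

def Spec_split_turns (frame : List (List (String × String))) (out : List (List (List (String × String)))) : Prop := out = split_turns_alt frame
instance (frame : List (List (String × String))) (out : List (List (List (String × String)))) : Decidable (Spec_split_turns frame out) := by unfold Spec_split_turns; infer_instance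

-- ===== CLAIM (what is proved, stated in full; the proofs are below) =====
def Claim_equal_split_turns : Prop := ∀ (frame : List (List (String × String))), Dom_split_turns frame → Pre_split_turns frame → Spec_split_turns frame (split_turns frame)

-- ===== LEMMAS AND PROOFS =====

-- A's loop as a recursion on the remaining events: current group curr with player p, rest to come
def pvConsume (p : String) (curr : List (List (String × String))) :
    List (List (String × String)) → List (List (List (String × String)))
  | [] => [curr]
  | e :: rest =>
      if pvKey e ≠ p then curr :: pvConsume (pvKey e) [e] rest
      else pvConsume p (curr ++ [e]) rest

theorem pvFoldl_consume (rest : List (List (String × String)))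
    (result : List (List (List (String × String)))) (curr : List (List (String × String))) (p : String) :
    (List.foldl pvAStep (result, curr, p) rest).1 ++ [(List.foldl pvAStep (result, curr, p) rest).2.1]
      = result ++ pvConsume p curr rest := by
  induction rest generalizing result curr p with
  | nil => simp [pvConsume]
  | cons e rest ih =>
      simp only [List.foldl_cons, pvAStep, pvConsume]
      by_cases h : pvKey e ≠ p
      · simp only [if_pos h]
        rw [ih]
        simp
      · simp only [if_neg h]
        rw [ih]

theorem pvConsume_runs (rest : List (List (String × String)))
    (p : String) (curr : List (List (String × String))) :
    pvConsume p curr rest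
      = (curr ++ rest.takeWhile (fun x => pvKey x == p)) ::
          pvRuns (rest.dropWhile (fun x => pvKey x == p)) := by
  induction rest generalizing p curr with
  | nil => simp [pvConsume, pvRuns]
  | cons e rest ih =>
      by_cases h : pvKey e = p
      · simp only [pvConsume, if_neg (by simp [h] : ¬ pvKey e ≠ p)]
        rw [ih]
        simp [h]
      · simp only [pvConsume, if_pos (by simpa using h)]
        rw [ih]
        have ht : (List.takeWhile (fun x => pvKey x == p) (e :: rest)) = [] := by
          simp [h]
        have hd : (List.dropWhile (fun x => pvKey x == p) (e :: rest)) = e :: rest := by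
          simp [h]
        rw [ht, hd]
        simp [pvRuns]

-- ===== VERDICT (by name: the statement is the Claim_ definition above) =====
theorem split_turns_spec : Claim_equal_split_turns := by
  intro frame _ hpre
  unfold Spec_split_turns split_turns split_turns_alt
  obtain ⟨hne, -⟩ := hpre
  cases frame with
  | nil => exact absurd rfl hne
  | cons e rest =>
      simp only [List.head?_cons, Option.map_some, Option.getD_some, List.foldl_cons]
      have hstep : pvAStep ([], [], pvKey e) e = ([], [e], pvKey e) := by
        simp [pvAStep]
      rw [hstep, pvFoldl_consume, pvConsume_runs]
      simp [pvRuns]
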